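-- pv_equiv track=rewrite | github.com/HappyHackingSpace/gakido | gakido/headers.py | canonicalize_headers
-- ===== SOURCE A (Python) =====
-- from collections.abc import Iterable
--
-- def _sanitize_header(name: str, value: str) -> tuple[str, str]:
--     """
--     Sanitize header name and value to prevent HTTP header injection (CRLF injection).
--     Strips CR, LF, and null bytes from both name and value.
--     """
--     # Remove \r, \n, and \x00 from header name and value
--     clean_name = name.replace("\r", "").replace("\n", "").replace("\x00", "")
--     clean_value = value.replace("\r", "").replace("\n", "").replace("\x00", "")
--     return clean_name, clean_value
--
-- def canonicalize_headers(
--     default_headers: Iterable[tuple[str, str]],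
--     user_headers: dict[str, str] | None,
--     order: Iterable[str],
-- ) -> list[tuple[str, str]]:
--     """
--     Merge user headers with defaults while respecting a deterministic order.
--     Later entries in the order list will override earlier ones when duplicates
--     exist. Unspecified headers are appended in user-specified insertion order.
--     """
--     merged: dict[str, tuple[str, str]] = {}
--     for name, value in default_headers:
--         name, value = _sanitize_header(name, value)
--         merged[name.lower()] = (name, value)
--     if user_headers:
--         for name, value in user_headers.items():
--             name, value = _sanitize_header(name, value)
--             merged[name.lower()] = (name, value)
--
--     ordered: list[tuple[str, str]] = []
--     for name in order:
--         key = name.lower()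
--         if key in merged:
--             ordered.append(merged.pop(key))
--     # Append anything unspecified to preserve user intent.
--     ordered.extend(merged.values())
--     return ordered
-- ===== SOURCE B (Python) =====
-- def _sanitize_header(name, value):
--     clean_name = name.replace("\r", "").replace("\n", "").replace("\x00", "")
--     clean_value = value.replace("\r", "").replace("\n", "").replace("\x00", "")
--     return clean_name, clean_value
--
-- def canonicalize_headers(default_headers, user_headers, order):
--     # One merged dict built from the concatenated pairs (later wins), then a
--     # stable sort on each entry's first position in `order` (absent -> end).
--     pairs = list(default_headers) + (list(user_headers.items()) if user_headers else [])
--     merged = {}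
--     for p in (_sanitize_header(*q) for q in pairs):
--         merged[p[0].lower()] = p
--     idx = {}
--     for i, name in enumerate(order):
--         k = name.lower()
--         if k not in idx:
--             idx[k] = i
--     n = len(order)
--     items = sorted(merged.items(), key=lambda kv: idx.get(kv[0], n))
--     return [hv for _, hv in items]
-- ===== Notes on version B (the rewrite author's own statement) =====
-- stated objective: alternative
-- what changed: A pops matched entries out of the merged dict while walking `order`; B never mutates the merged dict: it builds a first-occurrence position index from `order` and produces the result with one stable sort of the merged entries keyed by that position (absent keys sort to the end, insertion order preserved by stability).
import Mathlib
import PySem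

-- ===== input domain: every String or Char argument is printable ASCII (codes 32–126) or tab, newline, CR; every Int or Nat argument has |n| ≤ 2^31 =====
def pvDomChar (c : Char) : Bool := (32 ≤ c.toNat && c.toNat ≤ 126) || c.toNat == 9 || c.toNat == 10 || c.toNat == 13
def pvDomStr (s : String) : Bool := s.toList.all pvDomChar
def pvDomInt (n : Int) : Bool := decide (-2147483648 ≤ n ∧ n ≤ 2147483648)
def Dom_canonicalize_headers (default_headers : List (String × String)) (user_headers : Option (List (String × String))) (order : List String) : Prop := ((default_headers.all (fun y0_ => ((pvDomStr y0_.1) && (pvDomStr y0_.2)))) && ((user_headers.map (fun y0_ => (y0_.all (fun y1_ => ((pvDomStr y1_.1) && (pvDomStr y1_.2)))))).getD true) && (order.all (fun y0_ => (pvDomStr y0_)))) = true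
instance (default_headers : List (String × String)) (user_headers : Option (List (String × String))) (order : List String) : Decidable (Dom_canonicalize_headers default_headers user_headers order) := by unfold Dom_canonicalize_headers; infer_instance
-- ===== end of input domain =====

-- B replaces A's destructive pop-loop over `order` by a first-occurrence index
-- table plus one stable sort of the merged entries (objective: alternative).

-- ===== PORT A =====
-- _sanitize_header: strip "\r", "\n", "\x00" from name and value
def pvSanitize (name : String) (value : String) : String × String :=
  (PySem.Str.replace (PySem.Str.replace (PySem.Str.replace name "\r" "") "\n" "") "\x00" "",
   PySem.Str.replace (PySem.Str.replace (PySem.Str.replace value "\r" "") "\n" "") "\x00" "")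

def canonicalize_headers (default_headers : List (String × String)) (user_headers : Option (List (String × String))) (order : List String) : List (String × String) :=
  let merged := default_headers.foldl
    (fun m p => let q := pvSanitize p.1 p.2; m.insert (PySem.Str.lower q.1) q)
    PySem.Dict.empty
  let merged := match user_headers with   -- `if user_headers:` (fold over [] is a no-op)
    | none => merged
    | some l => l.foldl
        (fun m p => let q := pvSanitize p.1 p.2; m.insert (PySem.Str.lower q.1) q)
        merged
  -- for name in order: if key in merged: ordered.append(merged.pop(key))
  let st := order.foldl
    (fun (st : List (String × String) × PySem.Dict String (String × String)) name =>
      let key := PySem.Str.lower name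
      match st.2.pop? key with
      | some (hv, m') => (st.1 ++ [hv], m')
      | none => st)
    ([], merged)
  st.1 ++ st.2.values

-- ===== PORT B =====
def canonicalize_headers_alt (default_headers : List (String × String)) (user_headers : Option (List (String × String))) (order : List String) : List (String × String) :=
  let pairs := default_headers ++ user_headers.getD []
  let merged := pairs.foldl
    (fun m p => let q := pvSanitize p.1 p.2; m.insert (PySem.Str.lower q.1) q)
    PySem.Dict.empty
  -- idx: first position in `order` of each lowercased name
  let idx := (PySem.List.enumerate order).foldl
    (fun (d : PySem.Dict String Int) i =>
      let k := PySem.Str.lower i.2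
      if d.contains k then d else d.insert k i.1)
    PySem.Dict.empty
  let n : Int := order.length
  let items := PySem.List.sorted merged.items (fun kv => idx.getD kv.1 n) false
  items.map (·.2)

-- ===== PRECONDITION & SPEC =====
def Spec_canonicalize_headers (default_headers : List (String × String)) (user_headers : Option (List (String × String))) (order : List String) (out : List (String × String)) : Prop := out = canonicalize_headers_alt default_headers user_headers order
instance (default_headers : List (String × String)) (user_headers : Option (List (String × String))) (order : List String) (out : List (String × String)) : Decidable (Spec_canonicalize_headers default_headers user_headers order out) := by unfold Spec_canonicalize_headers; infer_instance

-- ===== CLAIM (what is proved, stated in full; the proofs are below) =====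
def Claim_equal_canonicalize_headers : Prop := ∀ (default_headers : List (String × String)) (user_headers : Option (List (String × String))) (order : List String), Dom_canonicalize_headers default_headers user_headers order → Spec_canonicalize_headers default_headers user_headers order (canonicalize_headers default_headers user_headers order)

-- ===== LEMMAS AND PROOFS =====

-- ---- proof-side helper definitions ----

-- first occurrences of each element of a list, in order of first appearance
def pvFirstOccs : List String → List String
  | [] => []
  | k :: r => k :: pvFirstOccs (r.filter (· ≠ k))
termination_by l => l.length
decreasing_by
  simp only [List.length_cons, List.length_unattach]
  exact Nat.lt_succ_of_le (le_trans (List.length_filter_le _ _) (by simp))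

-- A's order-loop step, on an already-lowercased key
def pvStepA (st : List (String × String) × PySem.Dict String (String × String)) (key : String) :
    List (String × String) × PySem.Dict String (String × String) :=
  match st.2.pop? key with
  | some (hv, m') => (st.1 ++ [hv], m')
  | none => st

-- the values A's loop pops, in the order it pops them
def pvHits (os : List String) (d : PySem.Dict String (String × String)) : List (String × String) :=
  match os with
  | [] => []
  | k :: r =>
    match d.get? k with
    | some v => v :: pvHits r (d.erase k)
    | none => pvHits r d

-- B's idx-building step
def pvStepI (d : PySem.Dict String Int) (i : Int × String) : PySem.Dict String Int :=
  let k := PySem.Str.lower i.2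
  if d.contains k then d else d.insert k i.1

-- recursion principle following pvFirstOccs's recursion

theorem pvFO_induction (P : List String → Prop) (h0 : P [])
    (h1 : ∀ k r, P (r.filter (· ≠ k)) → P (k :: r)) : ∀ os, P os := by
  intro os
  induction hn : os.length using Nat.strong_induction_on generalizing os with
  | _ n ih =>
    cases os with
    | nil => exact h0
    | cons k r =>
      refine h1 k r (ih (r.filter (· ≠ k)).length ?_ _ rfl)
      subst hn
      simp only [List.length_cons]
      exact Nat.lt_succ_of_le (List.length_filter_le _ _)

theorem pv_mem_firstOccs (a : String) : ∀ os, a ∈ pvFirstOccs os ↔ a ∈ os := by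
  refine pvFO_induction _ (by simp [pvFirstOccs]) ?_
  intro k r ih
  rw [pvFirstOccs]
  simp only [List.mem_cons, ih, List.mem_filter]
  by_cases hak : a = k <;> simp [hak]

theorem pv_idxOf_mono (k : String) : ∀ (r : List String) (a b : String),
    a ≠ k → b ≠ k →
    a ∈ r.filter (· ≠ k) →
    (r.filter (· ≠ k)).idxOf a < (r.filter (· ≠ k)).idxOf b →
    r.idxOf a < r.idxOf b := by
  intro r
  induction r with
  | nil => intro a b _ _ ha; simp at ha
  | cons x t ih =>
    intro a b hak hbk ha h
    by_cases hxk : x = k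
    · rw [List.filter_cons_of_neg (by simp [hxk])] at ha h
      rw [List.idxOf_cons_ne _ (by rw [hxk]; exact fun hh => hak hh.symm),
        List.idxOf_cons_ne _ (by rw [hxk]; exact fun hh => hbk hh.symm)]
      exact Nat.succ_lt_succ (ih a b hak hbk ha h)
    · rw [List.filter_cons_of_pos (by simp [hxk])] at ha h
      by_cases hax : a = x
      · subst hax
        rw [List.idxOf_cons_self] at h ⊢
        have hbx : b ≠ a := by
          intro hh
          rw [hh, List.idxOf_cons_self] at h
          omega
        rw [List.idxOf_cons_ne _ (fun hh => hbx hh.symm)]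
        omega
      · rw [List.idxOf_cons_ne _ (fun hh => hax hh.symm)] at h
        by_cases hbx : b = x
        · rw [hbx, List.idxOf_cons_self] at h
          omega
        · rw [List.idxOf_cons_ne _ (fun hh => hbx hh.symm)] at h
          have ha' : a ∈ t.filter (· ≠ k) := by
            rcases List.mem_cons.mp ha with h1 | h1
            · exact absurd h1 hax
            · exact h1
          rw [List.idxOf_cons_ne _ (fun hh => hax hh.symm),
            List.idxOf_cons_ne _ (fun hh => hbx hh.symm)]
          exact Nat.succ_lt_succ (ih a b hak hbk ha' (by omega))

theorem pv_firstOccs_pairwise : ∀ (os : List String),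
    (pvFirstOccs os).Pairwise (fun a b => os.idxOf a < os.idxOf b) := by
  refine pvFO_induction _ (by simp [pvFirstOccs]) ?_
  intro k r ih
  rw [pvFirstOccs]
  refine List.pairwise_cons.mpr ⟨?_, ?_⟩
  · intro b hb
    have hbmem := (pv_mem_firstOccs _ _).mp hb
    have hbk : b ≠ k := by
      have := List.of_mem_filter hbmem
      simpa using this
    rw [List.idxOf_cons_self, List.idxOf_cons_ne _ (fun hh => hbk hh.symm)]
    omega
  · refine List.Pairwise.imp_of_mem ?_ ih
    intro a b hamem hbmem hab
    have ha' := (pv_mem_firstOccs _ _).mp hamem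
    have hb' := (pv_mem_firstOccs _ _).mp hbmem
    have hak : a ≠ k := by have := List.of_mem_filter ha'; simpa using this
    have hbk : b ≠ k := by have := List.of_mem_filter hb'; simpa using this
    rw [List.idxOf_cons_ne _ (fun hh => hak hh.symm),
      List.idxOf_cons_ne _ (fun hh => hbk hh.symm)]
    exact Nat.succ_lt_succ (pv_idxOf_mono k r a b hak hbk ha' hab)

theorem pv_nodup_firstOccs : ∀ os, (pvFirstOccs os).Nodup := by
  refine pvFO_induction _ (by simp [pvFirstOccs]) ?_
  intro k r ih
  rw [pvFirstOccs]
  refine List.nodup_cons.mpr ⟨fun hk => ?_, ih⟩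
  have := (List.mem_filter.mp ((pv_mem_firstOccs _ _).mp hk)).2
  simp at this

theorem pv_firstOccs_filter : ∀ (os : List String) (p : String → Bool),
    pvFirstOccs (os.filter p) = (pvFirstOccs os).filter p := by
  refine pvFO_induction _ (by simp [pvFirstOccs]) ?_
  intro k r ih p
  by_cases hpk : p k
  · rw [List.filter_cons_of_pos hpk, pvFirstOccs, pvFirstOccs,
      List.filter_cons_of_pos hpk]
    congr 1
    rw [List.filter_comm, ih]
  · rw [List.filter_cons_of_neg (by simp [hpk]), pvFirstOccs,
      List.filter_cons_of_neg (by simp [hpk]), ← ih]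
    have heq : List.filter p r = List.filter p (List.filter (· ≠ k) r) := by
      rw [List.filter_comm]
      refine (List.filter_eq_self.mpr ?_).symm
      intro a ha
      have hpa := List.of_mem_filter ha
      simp only [decide_eq_true_eq]
      intro hak
      rw [hak] at hpa
      exact hpk hpa
    rw [heq]

theorem pv_find?_filter (k x : String) (hxk : x ≠ k) (t : List (String × (String × String))) :
    List.find? (fun p => p.1 == x) (t.filter (fun p => !(p.1 == k)))
      = List.find? (fun p => p.1 == x) t := by
  induction t with
  | nil => rfl
  | cons p t ih =>
    by_cases hpk : p.1 = k
    · rw [List.filter_cons_of_neg (by simp [hpk]),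
        List.find?_cons_of_neg (by simp [hpk]; exact fun h => hxk (h ▸ hpk ▸ rfl)), ih]
    · rw [List.filter_cons_of_pos (by simp [hpk])]
      by_cases hpx : p.1 = x
      · rw [List.find?_cons_of_pos (by simp [hpx]), List.find?_cons_of_pos (by simp [hpx])]
      · rw [List.find?_cons_of_neg (by simp [hpx]), List.find?_cons_of_neg (by simp [hpx]), ih]

theorem pv_erase_get? (d : PySem.Dict String (String × String)) (k x : String) :
    (d.erase k).get? x = if x = k then none else d.get? x := by
  obtain ⟨L⟩ := d
  simp only [PySem.Dict.get?, PySem.Dict.erase]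
  by_cases hxk : x = k
  · subst hxk
    rw [if_pos rfl, List.find?_eq_none.mpr]
    · rfl
    · intro a ha
      have h2 := (List.mem_filter.mp ha).2
      simp only [Bool.not_eq_eq_eq_not, Bool.not_true, beq_eq_false_iff_ne, ne_eq] at h2
      simp [h2]
  · rw [if_neg hxk, pv_find?_filter k x hxk]

theorem pv_loop_fst (os : List String) :
    ∀ (acc : List (String × String)) (d : PySem.Dict String (String × String)),
    (os.foldl pvStepA (acc, d)).1 = acc ++ pvHits os d := by
  induction os with
  | nil => intro acc d; simp [pvHits]
  | cons k r ih =>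
    intro acc d
    rw [List.foldl_cons, pvHits]
    cases hg : d.get? k with
    | some v =>
      have : pvStepA (acc, d) k = (acc ++ [v], d.erase k) := by
        simp [pvStepA, PySem.Dict.pop?, hg]
      rw [this, ih]
      simp
    | none =>
      have : pvStepA (acc, d) k = (acc, d) := by
        simp [pvStepA, PySem.Dict.pop?, hg]
      rw [this, ih]

theorem pv_loop_snd (os : List String) :
    ∀ (acc : List (String × String)) (d : PySem.Dict String (String × String)),
    (os.foldl pvStepA (acc, d)).2.items = d.items.filter (fun kv => !(os.contains kv.1)) := by
  induction os with
  | nil => intro acc d; simp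
  | cons k r ih =>
    intro acc d
    rw [List.foldl_cons]
    cases hg : d.get? k with
    | some v =>
      have hst : pvStepA (acc, d) k = (acc ++ [v], d.erase k) := by
        simp [pvStepA, PySem.Dict.pop?, hg]
      rw [hst, ih]
      show (d.items.filter fun p => !(p.1 == k)).filter _ = _
      rw [List.filter_filter]
      refine List.filter_congr ?_
      intro p _
      simp only [List.contains_cons]
      cases p.1 == k
      · simp
      · simp
    | none =>
      have hst : pvStepA (acc, d) k = (acc, d) := by
        simp [pvStepA, PySem.Dict.pop?, hg]
      rw [hst, ih]
      refine List.filter_congr ?_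
      intro p hp
      have hfind : List.find? (fun q => q.1 == k) d.items = none := by
        cases hf : List.find? (fun q => q.1 == k) d.items with
        | none => rfl
        | some q => simp [PySem.Dict.get?, hf] at hg
      have hpk : ¬ p.1 = k := by
        have := List.find?_eq_none.mp hfind p hp
        simpa using this
      simp [hpk]

theorem pv_filterMap_filter {β : Type} (p : String → Bool) (f g : String → Option β) :
    ∀ (l : List String),
    (∀ x ∈ l, p x = true → f x = g x) → (∀ x ∈ l, p x = false → f x = none) →
    l.filterMap f = (l.filter p).filterMap g := by
  intro l
  induction l with
  | nil => intro _ _; rfl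
  | cons x t ih =>
    intro h1 h2
    cases hp : p x with
    | true =>
      rw [List.filter_cons_of_pos hp, List.filterMap_cons, List.filterMap_cons,
        h1 x (by simp) hp]
      cases g x <;> simp [ih (fun y hy => h1 y (by simp [hy])) (fun y hy => h2 y (by simp [hy]))]
    | false =>
      rw [List.filter_cons_of_neg (by simp [hp]), List.filterMap_cons, h2 x (by simp) hp]
      exact ih (fun y hy => h1 y (by simp [hy])) (fun y hy => h2 y (by simp [hy]))

theorem pv_insertBy_append_of_before {α : Type} (before : α → α → Bool) (x : α) :
    ∀ (h m : List α), (∀ y ∈ m, before x y = true) →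
    PySem.List.insertBy before x (h ++ m) = PySem.List.insertBy before x h ++ m := by
  intro h
  induction h with
  | nil =>
    intro m hm
    cases m with
    | nil => rfl
    | cons y ys =>
      show PySem.List.insertBy before x (y :: ys) = [x] ++ (y :: ys)
      rw [PySem.List.insertBy, if_pos (hm y (by simp))]
      rfl
  | cons a h ih =>
    intro m hm
    show PySem.List.insertBy before x (a :: (h ++ m)) = PySem.List.insertBy before x (a :: h) ++ m
    rw [PySem.List.insertBy, PySem.List.insertBy]
    cases hba : before x a with
    | true => simp
    | false => simp [ih m hm]

theorem pv_foldl_insertBy_split {α : Type} (key : α → Int) (B : Int) :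
    ∀ (L h m : List α), (∀ x ∈ L, key x ≤ B) → (∀ y ∈ h, key y ≤ B) → (∀ y ∈ m, key y = B) →
    L.foldl (fun acc x => PySem.List.insertBy (fun a b => decide (key a < key b)) x acc) (h ++ m)
      = (L.filter (fun x => decide (key x < B))).foldl
          (fun acc x => PySem.List.insertBy (fun a b => decide (key a < key b)) x acc) h
        ++ (m ++ L.filter (fun x => !decide (key x < B))) := by
  intro L
  induction L with
  | nil => intro h m _ _ _; simp
  | cons x t ih =>
    intro h m hL hh hm
    rw [List.foldl_cons]
    by_cases hx : key x < B
    · rw [pv_insertBy_append_of_before _ _ h m (fun y hy => by simp [hm y hy, hx])]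
      rw [List.filter_cons_of_pos (by simp [hx]), List.filter_cons_of_neg (by simp [hx]),
        List.foldl_cons]
      exact ih (PySem.List.insertBy _ x h) m (fun y hy => hL y (by simp [hy]))
        (fun y hy => by
          rcases (PySem.List.mem_insertBy _ _ _ _).mp hy with h1 | h1
          · exact h1 ▸ hL x (by simp)
          · exact hh y h1)
        hm
    · have hxB : key x = B := le_antisymm (hL x (by simp)) (by omega)
      rw [PySem.List.insertBy_of_forall_not_before _ _ _ (fun y hy => by
        rcases List.mem_append.mp hy with h1 | h1
        · simp only [decide_eq_false_iff_not, not_lt]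
          calc key y ≤ B := hh y h1
            _ = key x := hxB.symm
        · simp only [decide_eq_false_iff_not, not_lt, hm y h1, hxB, le_refl])]
      rw [List.filter_cons_of_neg (by simp [hx]), List.filter_cons_of_pos (by simp [hx])]
      rw [List.append_assoc]
      have := ih h (m ++ [x]) (fun y hy => hL y (by simp [hy])) hh
        (fun y hy => by
          rcases List.mem_append.mp hy with h1 | h1
          · exact hm y h1
          · simp at h1; exact h1 ▸ hxB)
      rw [this]
      simp

theorem pv_sorted_split {α : Type} (key : α → Int) (B : Int) (L : List α)
    (hL : ∀ x ∈ L, key x ≤ B) :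
    PySem.List.sorted L key
      = PySem.List.sorted (L.filter (fun x => decide (key x < B))) key
        ++ L.filter (fun x => !decide (key x < B)) := by
  rw [PySem.List.sorted_eq_foldl_insertBy, PySem.List.sorted_eq_foldl_insertBy]
  have := pv_foldl_insertBy_split key B L [] [] hL (by simp) (by simp)
  simpa using this

theorem pv_hits_eq : ∀ (os : List String) (d : PySem.Dict String (String × String)),
    pvHits os d = (pvFirstOccs os).filterMap (fun k => d.get? k) := by
  intro os
  induction os with
  | nil => intro d; rw [pvHits, pvFirstOccs]; rfl
  | cons k r ih =>
    intro d
    rw [pvHits, pvFirstOccs, List.filterMap_cons]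
    cases hg : d.get? k with
    | some v =>
      dsimp only
      rw [ih (d.erase k)]
      congr 1
      rw [pv_firstOccs_filter r (fun x => decide (x ≠ k))]
      refine pv_filterMap_filter (fun x => decide (x ≠ k)) _ _ _ ?_ ?_
      · intro x _ hx
        rw [pv_erase_get?, if_neg (by simpa using hx)]
      · intro x _ hx
        have : x = k := by simpa using hx
        rw [pv_erase_get?, if_pos this]
    | none =>
      dsimp only
      rw [ih d]
      rw [pv_firstOccs_filter r (fun x => decide (x ≠ k))]
      refine pv_filterMap_filter (fun x => decide (x ≠ k)) _ _ _ ?_ ?_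
      · intro x _ _
        rfl
      · intro x _ hx
        have : x = k := by simpa using hx
        rw [this, hg]

theorem pv_idx_getD : ∀ (l : List String) (j : Int) (d : PySem.Dict String Int) (k : String) (n : Int),
    ((PySem.List.enumerate l j).foldl pvStepI d).getD k n
      = if d.contains k then d.getD k n
        else if k ∈ l.map PySem.Str.lower then j + ((l.map PySem.Str.lower).idxOf k : Int)
        else n := by
  intro l
  induction l with
  | nil =>
    intro j d k n
    simp only [PySem.List.enumerate, List.foldl_nil, List.map_nil, List.not_mem_nil, if_false]
    by_cases h : d.contains k
    · rw [if_pos h]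
    · rw [if_neg h, PySem.Dict.getD_of_not_contains d n (by simpa using h)]
  | cons x t ih =>
    intro j d k n
    rw [PySem.List.enumerate_cons, List.foldl_cons]
    by_cases hdk : d.contains k
    · -- step keeps "contains k", getD k unchanged
      have hcont : (pvStepI d (j, x)).contains k := by
        simp only [pvStepI]
        split
        · exact hdk
        · rw [PySem.Dict.contains_insert]
          simp [hdk]
      have hgd : (pvStepI d (j, x)).getD k n = d.getD k n := by
        simp only [pvStepI]
        split
        · rfl
        · rename_i hnc
          rw [PySem.Dict.getD_insert]
          have : ¬ k = PySem.Str.lower x := by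
            intro h
            rw [← h] at hnc
            exact hnc hdk
          rw [if_neg this]
      rw [ih (j + 1) (pvStepI d (j, x)) k n, if_pos hcont, hgd, if_pos hdk]
    · by_cases hkx : k = PySem.Str.lower x
      · -- head occurrence: idxOf = 0
        have hstep : pvStepI d (j, x) = d.insert (PySem.Str.lower x) j := by
          simp only [pvStepI]
          rw [if_neg (by rwa [← hkx])]
        have hcont : (pvStepI d (j, x)).contains k := by
          rw [hstep, hkx, PySem.Dict.contains_insert]
          simp
        rw [ih (j + 1) _ k n, if_pos hcont, hstep, PySem.Dict.getD_insert, if_pos hkx,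
          if_neg hdk, List.map_cons, if_pos (by simp [hkx]), hkx, List.idxOf_cons_self]
        simp
      · have hstep_contains : (pvStepI d (j, x)).contains k = false := by
          simp only [pvStepI]
          split
          · simpa using hdk
          · rw [PySem.Dict.contains_insert]
            simp only [Bool.or_eq_false_iff]
            exact ⟨by simpa using hkx, by simpa using hdk⟩
        rw [ih (j + 1) _ k n, if_neg (by simp [hstep_contains]), if_neg hdk, List.map_cons]
        by_cases hmem : k ∈ t.map PySem.Str.lower
        · rw [if_pos hmem, if_pos (by simp [hmem]),
            List.idxOf_cons_ne _ (fun h => hkx h.symm)]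
          push_cast
          ring
        · rw [if_neg hmem, if_neg (by simp [hmem, hkx])]

-- ---- main equivalence of the order phase ----

theorem pv_phase2 (order : List String) (d : PySem.Dict String (String × String))
    (hnd : d.keys.Nodup) :
    (PySem.List.sorted d.items
        (fun kv => ((PySem.List.enumerate order).foldl pvStepI PySem.Dict.empty).getD kv.1
                     (order.length : Int))).map (·.2)
      = pvHits (order.map PySem.Str.lower) d
        ++ (d.items.filter (fun kv => !((order.map PySem.Str.lower).contains kv.1))).map (·.2) := by
  have hnd' : (d.items.map (·.1)).Nodup := hnd
  have hLnodup : d.items.Nodup := List.Nodup.of_map _ hnd'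
  set os : List String := order.map PySem.Str.lower with hos
  set n : Int := (order.length : Int) with hn
  set idx := (PySem.List.enumerate order).foldl pvStepI PySem.Dict.empty with hidx
  have hkey : ∀ k : String, idx.getD k n = if k ∈ os then ((os.idxOf k : Nat) : Int) else n := by
    intro k
    rw [hidx, pv_idx_getD order 0 PySem.Dict.empty k n, ← hos]
    simp only [PySem.Dict.contains_empty, Bool.false_eq_true, if_false, zero_add]
  have hlt : ∀ k ∈ os, ((os.idxOf k : Nat) : Int) < n := by
    intro k hk
    have h1 := List.idxOf_lt_length_of_mem hk
    have h2 : os.length = order.length := List.length_map _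
    rw [hn]
    exact_mod_cast h2 ▸ h1
  have hkey_lt : ∀ k : String, (idx.getD k n < n) ↔ k ∈ os := by
    intro k
    rw [hkey k]
    by_cases hmem : k ∈ os
    · simp only [hmem, iff_true, if_true]
      exact hlt k hmem
    · simp [hmem]
  have hb : ∀ kv ∈ d.items, idx.getD kv.1 n ≤ n := by
    intro kv _
    rw [hkey kv.1]
    by_cases hmem : kv.1 ∈ os
    · rw [if_pos hmem]
      exact le_of_lt (hlt kv.1 hmem)
    · rw [if_neg hmem]
  rw [pv_sorted_split (fun kv => idx.getD kv.1 n) n d.items hb, List.map_append]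
  congr 1
  · -- the popped part: sorted hits = first-occurrence filterMap
    have hsorted : PySem.List.sorted
        (d.items.filter fun kv => decide (idx.getD kv.1 n < n)) (fun kv => idx.getD kv.1 n)
        = (pvFirstOccs os).filterMap (fun k => (d.get? k).map (fun v => (k, v))) := by
      apply PySem.List.sorted_eq_of_perm_of_pairwise_lt
      · -- permutation, via nodup + same members
        have hHnodup : ((pvFirstOccs os).filterMap (fun k => (d.get? k).map (fun v => (k, v)))).Nodup := by
          refine List.Nodup.filterMap ?_ (pv_nodup_firstOccs os)
          intro a a' b hba hba'
          rcases Option.map_eq_some_iff.mp hba with ⟨v, _, hv⟩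
          rcases Option.map_eq_some_iff.mp hba' with ⟨v', _, hv'⟩
          rw [← hv] at hv'
          exact (congrArg Prod.fst hv').symm
        rw [List.perm_ext_iff_of_nodup hHnodup (hLnodup.filter _)]
        intro x
        rw [List.mem_filterMap, List.mem_filter]
        constructor
        · rintro ⟨a, ha, hmap⟩
          rcases Option.map_eq_some_iff.mp hmap with ⟨v, hget, hxav⟩
          have hxa : x.1 = a := by rw [← hxav]
          have hxv : x.2 = v := by rw [← hxav]
          refine ⟨?_, ?_⟩
          · have : (x.1, x.2) ∈ d.items := by
              rw [hxa, hxv]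
              exact (PySem.Dict.get?_eq_some_iff_mem_items d a v hnd).mp hget
            simpa using this
          · simp only [decide_eq_true_eq]
            rw [hkey_lt, hxa]
            exact (pv_mem_firstOccs a os).mp ha
        · rintro ⟨hxmem, hxlt⟩
          refine ⟨x.1, ?_, ?_⟩
          · rw [pv_mem_firstOccs x.1 os, ← hkey_lt]
            simpa using hxlt
          · have : d.get? x.1 = some x.2 :=
              (PySem.Dict.get?_eq_some_iff_mem_items d x.1 x.2 hnd).mpr (by simpa using hxmem)
            rw [this]
            simp
      · -- strictly increasing keys along the first-occurrence list
        rw [List.pairwise_filterMap]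
        refine List.Pairwise.imp_of_mem ?_ (pv_firstOccs_pairwise os)
        intro a b hamem hbmem hab p hp q hq
        rcases Option.map_eq_some_iff.mp hp with ⟨v, _, hpv⟩
        rcases Option.map_eq_some_iff.mp hq with ⟨w, _, hqw⟩
        have hpa : p.1 = a := by rw [← hpv]
        have hqb : q.1 = b := by rw [← hqw]
        rw [hpa, hqb, hkey a, hkey b,
          if_pos ((pv_mem_firstOccs a os).mp hamem), if_pos ((pv_mem_firstOccs b os).mp hbmem)]
        exact_mod_cast hab
    rw [hsorted, List.map_filterMap, pv_hits_eq os d]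
    congr 1
    funext k
    cases d.get? k <;> simp
  · -- the leftover part: same filter
    refine congrArg _ (List.filter_congr ?_)
    intro kv hkv
    by_cases hmem : kv.1 ∈ os
    · simp [hkey_lt, hmem]
    · simp [hkey_lt, hmem]

-- ===== VERDICT (by name: the statement is the Claim_ definition above) =====
theorem pv_assemble (order : List String) (m : PySem.Dict String (String × String))
    (hnd : m.keys.Nodup) :
    (order.foldl
        (fun (st : List (String × String) × PySem.Dict String (String × String)) name =>
          match st.2.pop? (PySem.Str.lower name) with
          | some (hv, m') => (st.1 ++ [hv], m')
          | none => st) ([], m)).1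
      ++ (order.foldl
        (fun (st : List (String × String) × PySem.Dict String (String × String)) name =>
          match st.2.pop? (PySem.Str.lower name) with
          | some (hv, m') => (st.1 ++ [hv], m')
          | none => st) ([], m)).2.values
      = (PySem.List.sorted m.items
          (fun kv => ((PySem.List.enumerate order).foldl pvStepI PySem.Dict.empty).getD kv.1
            (order.length : Int))).map (·.2) := by
  have hloop : order.foldl
      (fun (st : List (String × String) × PySem.Dict String (String × String)) name =>
        match st.2.pop? (PySem.Str.lower name) with
        | some (hv, m') => (st.1 ++ [hv], m')
        | none => st) ([], m)
      = (order.map PySem.Str.lower).foldl pvStepA ([], m) := by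
    rw [List.foldl_map]
    rfl
  rw [hloop]
  have hvals : ∀ d : PySem.Dict String (String × String), d.values = d.items.map (·.2) :=
    fun d => rfl
  rw [hvals, pv_loop_fst, pv_loop_snd, List.nil_append]
  exact (pv_phase2 order m hnd).symm

theorem canonicalize_headers_spec : Claim_equal_canonicalize_headers := by
  intro default_headers user_headers order _
  unfold Spec_canonicalize_headers canonicalize_headers canonicalize_headers_alt
  have hnd : ∀ pairs : List (String × String),
      ((pairs.foldl
        (fun m p => let q := pvSanitize p.1 p.2; m.insert (PySem.Str.lower q.1) q)
        PySem.Dict.empty : PySem.Dict String (String × String))).keys.Nodup := by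
    intro pairs
    exact PySem.Dict.nodup_keys_foldl_insert_key pairs
      (fun p => PySem.Str.lower (pvSanitize p.1 p.2).1)
      (fun d p => pvSanitize p.1 p.2)
      PySem.Dict.empty PySem.Dict.nodup_keys_empty
  cases user_headers with
  | none =>
    dsimp only [Option.getD]
    rw [List.append_nil]
    exact pv_assemble order _ (hnd default_headers)
  | some l =>
    dsimp only [Option.getD]
    rw [List.foldl_append]
    exact pv_assemble order _ (by
      have := PySem.Dict.nodup_keys_foldl_insert_key (default_headers ++ l)
        (fun p => PySem.Str.lower (pvSanitize p.1 p.2).1)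
        (fun d p => pvSanitize p.1 p.2)
        PySem.Dict.empty PySem.Dict.nodup_keys_empty
      rw [List.foldl_append] at this
      exact this)
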